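-- pv_equiv track=rewrite | github.com/Neeravpawar/CoT_GAMs | GAMS_static_cheker.py | _filter_unused_symbols
-- ===== SOURCE A (Python) =====
-- from typing import Dict, List, Optional, Set, Tuple, Any
--
-- def _filter_unused_symbols(unused: Set[str], symbol_table: Dict[str, str], lines: List[Tuple[int, str]]) -> Set[str]:
--     """Filter unused symbols to remove false positives"""
--     filtered = set()
--
--     for symbol in unused:
--         symbol_type = symbol_table.get(symbol)
--         # Keep variables and equations that are truly unused
--         if symbol_type in ['variable', 'equation']:
--             # Double check if they're actually used
--             truly_unused = True
--             for line_num, line in lines: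
--                 if (f"{symbol}(" in line or f".{symbol}" in line or
--                     f" {symbol} " in line and not line.strip().startswith(symbol)):
--                     truly_unused = False
--                     break
--             if truly_unused:
--                 filtered.add(symbol)
--
--     return filtered
-- ===== SOURCE B (Python) =====
-- def _filter_unused_symbols(unused, symbol_table, lines):
--     """Mark-then-subtract: one pass over the lines marks each candidate the line
--     uses; the result is candidates minus the marked set."""
--     candidates = [s for s in unused
--                   if symbol_table.get(s) in ('variable', 'equation')]
--     used = set()
--     for _num, line in lines:
--         head = line.strip()
--         for s in candidates:
--             if any(p in line for p in (s + "(", "." + s)) or \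
--                (" " + s + " " in line and not head.startswith(s)):
--                 used.add(s)
--     return {s for s in candidates if s not in used}
-- ===== Notes on version B (the rewrite author's own statement) =====
-- stated objective: alternative
-- what changed: Instead of re-scanning all lines for each unused symbol with early exit, B pre-selects the variable/equation candidates once, makes a single pass over the lines building a 'used' mark set, and returns the candidates minus that set.
import Mathlib
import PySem

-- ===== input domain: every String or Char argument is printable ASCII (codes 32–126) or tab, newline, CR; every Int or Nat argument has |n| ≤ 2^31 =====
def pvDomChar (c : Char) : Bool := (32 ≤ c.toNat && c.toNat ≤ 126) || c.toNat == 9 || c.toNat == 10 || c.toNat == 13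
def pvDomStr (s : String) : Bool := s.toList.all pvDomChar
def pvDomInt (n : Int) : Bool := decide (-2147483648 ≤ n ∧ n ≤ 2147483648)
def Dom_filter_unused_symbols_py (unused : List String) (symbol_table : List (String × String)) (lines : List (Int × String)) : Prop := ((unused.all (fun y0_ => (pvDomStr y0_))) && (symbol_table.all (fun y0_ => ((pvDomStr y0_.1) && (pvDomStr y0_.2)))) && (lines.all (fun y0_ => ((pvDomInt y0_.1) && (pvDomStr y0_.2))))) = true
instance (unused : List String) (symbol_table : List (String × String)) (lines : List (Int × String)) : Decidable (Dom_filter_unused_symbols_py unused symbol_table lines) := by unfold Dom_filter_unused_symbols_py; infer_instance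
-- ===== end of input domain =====

-- B is a mark-then-subtract rewrite of A (one pass over the lines marking used candidates, result = candidates minus marks); proved to return exactly A's value.


-- ===== PORT A =====
def filter_unused_symbols_py (unused : List String) (symbol_table : List (String × String)) (lines : List (Int × String)) : List String :=
  unused.foldl (fun filtered symbol =>
    let symbol_type := (PySem.Dict.mk symbol_table).get? symbol
    if symbol_type == some "variable" || symbol_type == some "equation" then
      let truly_unused := lines.foldl (fun tu ln =>
        if PySem.Chars.isIn (symbol.toList ++ ['(']) ln.2.toList ||
           PySem.Chars.isIn ('.' :: symbol.toList) ln.2.toList ||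
           (PySem.Chars.isIn (' ' :: (symbol.toList ++ [' '])) ln.2.toList &&
            !PySem.Chars.startswith (PySem.Chars.strip ln.2.toList) symbol.toList)
        then false else tu) true
      if truly_unused then PySem.Set.add filtered symbol else filtered
    else filtered) PySem.Set.empty

-- ===== PORT B =====
def filter_unused_symbols_py_alt (unused : List String) (symbol_table : List (String × String)) (lines : List (Int × String)) : List String :=
  let candidates := unused.filter (fun s =>
    match (PySem.Dict.mk symbol_table).get? s with
    | some t => t == "variable" || t == "equation"
    | none => false)
  let used := lines.foldl (fun (u : PySem.Set String) ln =>
    let head := PySem.Str.strip ln.2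
    candidates.foldl (fun u s =>
      if [s ++ "(", "." ++ s].any (fun p => PySem.Str.isIn p ln.2) ||
         (PySem.Str.isIn (" " ++ s ++ " ") ln.2 && !PySem.Str.startswith head s)
      then PySem.Set.add u s else u) u) PySem.Set.empty
  PySem.Set.ofList (candidates.filter (fun s => !PySem.Set.contains used s))

-- ===== PRECONDITION & SPEC =====
def Spec_filter_unused_symbols_py (unused : List String) (symbol_table : List (String × String)) (lines : List (Int × String)) (out : List String) : Prop := out = filter_unused_symbols_py_alt unused symbol_table lines
instance (unused : List String) (symbol_table : List (String × String)) (lines : List (Int × String)) (out : List String) : Decidable (Spec_filter_unused_symbols_py unused symbol_table lines out) := by unfold Spec_filter_unused_symbols_py; infer_instance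

-- ===== CLAIM (what is proved, stated in full; the proofs are below) =====
def Claim_equal_filter_unused_symbols_py : Prop := ∀ (unused : List String) (symbol_table : List (String × String)) (lines : List (Int × String)), Dom_filter_unused_symbols_py unused symbol_table lines → Spec_filter_unused_symbols_py unused symbol_table lines (filter_unused_symbols_py unused symbol_table lines)

-- ===== LEMMAS AND PROOFS =====

-- the per-line "symbol is used here" test (A's formulation), abstracted for the proof
def pvHit (s : String) (ln : Int × String) : Bool :=
  PySem.Chars.isIn (s.toList ++ ['(']) ln.2.toList ||
  PySem.Chars.isIn ('.' :: s.toList) ln.2.toList ||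
  (PySem.Chars.isIn (' ' :: (s.toList ++ [' '])) ln.2.toList &&
   !PySem.Chars.startswith (PySem.Chars.strip ln.2.toList) s.toList)

def pvTypeOk (symbol_table : List (String × String)) (s : String) : Bool :=
  (PySem.Dict.mk symbol_table).get? s == some "variable" || (PySem.Dict.mk symbol_table).get? s == some "equation"

-- A in normal form: the survivors of unused, folded into a set
theorem pvA_eq (unused : List String) (st : List (String × String)) (lines : List (Int × String)) :
    filter_unused_symbols_py unused st lines =
      PySem.Set.ofList (unused.filter (fun s => pvTypeOk st s && lines.all (fun ln => !pvHit s ln))) := by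
  unfold filter_unused_symbols_py
  rw [PySem.Set.ofList_eq_foldl, ← PySem.List.foldl_if_eq_foldl_filter]
  apply PySem.List.foldl_congr_mem
  intro acc s _
  simp only [pvTypeOk, pvHit, PySem.List.foldl_if_false_eq, Bool.true_and]
  by_cases h1 : ((PySem.Dict.mk st).get? s == some "variable" || (PySem.Dict.mk st).get? s == some "equation") = true
  · simp only [h1, Bool.true_and, if_true, ← List.not_any_eq_all_not]
  · simp [h1]

-- B's candidate test equals A's
theorem pvTypeOk_match (st : List (String × String)) (s : String) :
    (match (PySem.Dict.mk st).get? s with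
     | some t => t == "variable" || t == "equation"
     | none => false) = pvTypeOk st s := by
  cases h : (PySem.Dict.mk st).get? s <;> simp [pvTypeOk, h]

-- B's per-line test equals A's pvHit
theorem pvHit_str (s : String) (ln : Int × String) :
    ([s ++ "(", "." ++ s].any (fun p => PySem.Str.isIn p ln.2) ||
     (PySem.Str.isIn (" " ++ s ++ " ") ln.2 && !PySem.Str.startswith (PySem.Str.strip ln.2) s)) =
    pvHit s ln := by
  simp [pvHit, List.any_cons, String.toList_append]

-- marking inner loop: membership after folding one line's marks
theorem pvMark_inner (g : String → Bool) (c : List String) (u : List String) (x : String) :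
    (x ∈ c.foldl (fun u s => if g s then PySem.Set.add u s else u) u) ↔
      x ∈ u ∨ (x ∈ c ∧ g x = true) := by
  induction c generalizing u with
  | nil => simp
  | cons a c ih =>
      simp only [List.foldl_cons, ih, List.mem_cons]
      by_cases hg : g a = true
      · simp only [hg, if_true, PySem.Set.mem_add]
        constructor
        · rintro ((h | rfl) | h)
          · exact Or.inl h
          · exact Or.inr ⟨Or.inl rfl, hg⟩
          · exact Or.inr ⟨Or.inr h.1, h.2⟩
        · rintro (h | ⟨(rfl | h), hx⟩)
          · exact Or.inl (Or.inl h)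
          · exact Or.inl (Or.inr rfl)
          · exact Or.inr ⟨h, hx⟩
      · simp only [hg]
        constructor
        · rintro (h | h)
          · exact Or.inl h
          · exact Or.inr ⟨Or.inr h.1, h.2⟩
        · rintro (h | ⟨(rfl | h), hx⟩)
          · exact Or.inl h
          · exact absurd hx hg
          · exact Or.inr ⟨h, hx⟩

-- marking outer loop: membership in the final used set
theorem pvMark_outer (hit : String → (Int × String) → Bool) (lines : List (Int × String))
    (c : List String) (u : List String) (x : String) :
    (x ∈ lines.foldl (fun u ln => c.foldl (fun u s => if hit s ln then PySem.Set.add u s else u) u) u) ↔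
      x ∈ u ∨ (x ∈ c ∧ lines.any (fun ln => hit x ln) = true) := by
  induction lines generalizing u with
  | nil => simp
  | cons l ls ih =>
      simp only [List.foldl_cons, ih, pvMark_inner, List.any_cons]
      constructor
      · rintro ((h | ⟨hc, hl⟩) | ⟨hc, ha⟩)
        · exact Or.inl h
        · exact Or.inr ⟨hc, by simp [hl]⟩
        · exact Or.inr ⟨hc, by simp [ha]⟩
      · rintro (h | ⟨hc, hor⟩)
        · exact Or.inl (Or.inl h)
        · rcases Bool.or_eq_true_iff.mp hor with hl | ha
          · exact Or.inl (Or.inr ⟨hc, hl⟩)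
          · exact Or.inr ⟨hc, ha⟩

theorem pvB_eq (unused : List String) (symbol_table : List (String × String)) (lines : List (Int × String)) :
    filter_unused_symbols_py_alt unused symbol_table lines =
      PySem.Set.ofList (unused.filter (fun s => pvTypeOk symbol_table s && lines.all (fun ln => !pvHit s ln))) := by
  unfold filter_unused_symbols_py_alt
  simp only [pvTypeOk_match, pvHit_str, List.filter_filter]
  congr 1
  apply List.filter_congr
  intro s hs
  by_cases ht : pvTypeOk symbol_table s = true
  · have hc : s ∈ unused.filter (fun s => pvTypeOk symbol_table s) := List.mem_filter.mpr ⟨hs, ht⟩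
    have key : PySem.Set.contains
        (lines.foldl (fun u ln => (unused.filter (fun s => pvTypeOk symbol_table s)).foldl
          (fun u s => if pvHit s ln then PySem.Set.add u s else u) u) PySem.Set.empty) s
        = lines.any (fun ln => pvHit s ln) := by
      rw [Bool.eq_iff_iff, PySem.Set.contains_iff, pvMark_outer]
      simp [PySem.Set.empty, hc]
    rw [key]
    simp [ht, ← List.not_any_eq_all_not]
  · simp [ht]

-- ===== VERDICT (by name: the statement is the Claim_ definition above) =====
theorem filter_unused_symbols_py_spec : Claim_equal_filter_unused_symbols_py := by
  intro unused st lines _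
  unfold Spec_filter_unused_symbols_py
  rw [pvA_eq, pvB_eq]
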